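-- pv_equiv track=rewrite | github.com/AmerMohammad1997/python_practice | practice/symbol_in_string.py | add_sym_even
-- ===== SOURCE A (Python) =====
-- def add_sym_even(given_str):
--     result = ""
--     for letter in range(len(given_str)):
--         if (letter+1)% 2 ==0:
--             result += "#"
--         else:
--             result +=given_str[letter]
--     return result
-- ===== SOURCE B (Python) =====
-- def add_sym_even(given_str):
--     out = []
--     it = iter(given_str)
--     for c in it:
--         out.append(c)
--         if next(it, None) is not None:
--             out.append('#')
--     return ''.join(out)
-- ===== Notes on version B (the rewrite author's own statement) =====
-- stated objective: simpler
-- what changed: Replaces the index-parity loop with quadratic string concatenation by pairwise iterator consumption into a list joined once: each step emits one character and, if a following character exists, the symbol character, eliminating indices and the parity test.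
import Mathlib
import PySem

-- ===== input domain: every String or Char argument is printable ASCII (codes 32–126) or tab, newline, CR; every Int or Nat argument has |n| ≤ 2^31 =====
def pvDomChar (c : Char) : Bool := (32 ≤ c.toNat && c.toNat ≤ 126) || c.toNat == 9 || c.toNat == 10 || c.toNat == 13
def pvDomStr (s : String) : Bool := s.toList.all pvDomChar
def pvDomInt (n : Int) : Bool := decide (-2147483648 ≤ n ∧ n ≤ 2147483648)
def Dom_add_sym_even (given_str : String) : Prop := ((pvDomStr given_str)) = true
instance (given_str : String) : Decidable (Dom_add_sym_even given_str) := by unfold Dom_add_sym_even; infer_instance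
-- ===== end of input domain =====

-- B replaces the index-parity loop by pairwise consumption of the characters (two at a time); same return value; a timing run measured B faster.

-- ===== PORT A =====
-- result = ""; for letter in range(len(given_str)): if (letter+1)%2==0: result += "#" else result += given_str[letter]
-- given_str[letter] is always in range (letter < len), so Python never raises; the .getD ' ' default is unreachable.
def add_sym_even (given_str : String) : String :=
  String.ofList <|
    (List.range given_str.toList.length).foldl
      (fun (result : List Char) (letter : Nat) =>
        if (letter + 1) % 2 == 0 then result ++ ['#']
        else result ++ [((PySem.List.pyGet? given_str.toList ((letter : Nat) : Int)).getD ' ')])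
      []

-- ===== PORT B =====
-- out = []; for c in it: out.append(c); if next(it, None) is not None: out.append('#')  — each loop
-- iteration consumes a pair (c and, if present, the char after it); pairRec is that pairwise consumption.
def pairRec : List Char → List Char
  | c :: _ :: rest => c :: '#' :: pairRec rest
  | short => short

def add_sym_even_alt (given_str : String) : String :=
  String.ofList (pairRec given_str.toList)

-- ===== PRECONDITION & SPEC =====
def Spec_add_sym_even (given_str : String) (out : String) : Prop := out = add_sym_even_alt given_str
instance (given_str : String) (out : String) : Decidable (Spec_add_sym_even given_str out) := by unfold Spec_add_sym_even; infer_instance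

-- ===== CLAIM (what is proved, stated in full; the proofs are below) =====
def Claim_equal_add_sym_even : Prop := ∀ (given_str : String), Dom_add_sym_even given_str → Spec_add_sym_even given_str (add_sym_even given_str)

-- ===== LEMMAS AND PROOFS =====

-- ===== VERDICT (by name: the statement is the Claim_ definition above) =====
-- generic: appending one mapped element per step is a map
theorem foldl_append_map {α β : Type} (g : α → β) :
    ∀ (l : List α) (acc : List β),
      l.foldl (fun r i => r ++ [g i]) acc = acc ++ l.map g := by
  intro l
  induction l with
  | nil => intro acc; simp
  | cons a t ih => intro acc; simp [List.foldl, ih]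

theorem range_map_pairRec (cs : List Char) :
    (List.range cs.length).map
      (fun i => if (i + 1) % 2 == 0 then '#' else cs.getD i ' ') = pairRec cs := by
  match cs with
  | [] => simp [pairRec]
  | [c] => simp [pairRec, List.range_succ]
  | a :: b :: rest =>
    have ih := range_map_pairRec rest
    simp only [List.length_cons, List.range_succ_eq_map, List.map_cons, List.map_map, pairRec]
    refine List.cons_eq_cons.mpr ⟨by simp, List.cons_eq_cons.mpr ⟨by simp, ?_⟩⟩
    rw [← ih]
    apply List.map_congr_left
    intro i _
    have h2 : (i + 1 + 1 + 1) % 2 = (i + 1) % 2 := by omega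
    simp [Function.comp, h2]

theorem add_sym_even_spec : Claim_equal_add_sym_even := by
  intro s _
  unfold Spec_add_sym_even add_sym_even add_sym_even_alt
  have hfun :
      (fun (result : List Char) (letter : Nat) =>
        if (letter + 1) % 2 == 0 then result ++ ['#']
        else result ++ [((PySem.List.pyGet? s.toList ((letter : Nat) : Int)).getD ' ')]) =
      fun (r : List Char) (i : Nat) =>
        r ++ [if (i + 1) % 2 == 0 then '#'
              else ((PySem.List.pyGet? s.toList ((i : Nat) : Int)).getD ' ')] := by
    funext r i
    split <;> rfl
  rw [hfun, foldl_append_map]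
  simp only [List.nil_append]
  rw [← range_map_pairRec s.toList]
  congr 1
  apply List.map_congr_left
  intro i hi
  simp at hi
  simp [PySem.List.pyGet?_natCast, List.getD, List.getElem?_eq_getElem hi]
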